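-- pv_equiv track=rewrite | github.com/wanwanaa/transformer-bert | utils/data.py | index2sentence
-- ===== SOURCE A (Python) =====
-- def index2sentence(index, idx2word):
--     sen = []
--     for i in range(len(index)):
--         if idx2word[index[i]] == '[SEP]':
--             break
--         if idx2word[index[i]] == '<S>':
--             continue
--         else:
--             sen.append(idx2word[index[i]])
--     if len(sen) == 0:
--         sen.append('[UNK]')
--     return sen
-- ===== SOURCE B (Python) =====
-- def _collect(index, idx2word):
--     # words up to (excluding) the first '[SEP]', skipping '<S>', by structural recursion
--     if not index:
--         return []
--     w = idx2word[index[0]]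
--     if w == '[SEP]':
--         return []
--     rest = _collect(index[1:], idx2word)
--     return rest if w == '<S>' else [w] + rest
--
-- def index2sentence(index, idx2word):
--     return _collect(index, idx2word) or ['[UNK]']
-- ===== Notes on version B (the rewrite author's own statement) =====
-- stated objective: alternative
-- what changed: Replaces the index-driven loop with break/continue by structural recursion on the list that builds the sentence front-to-back, and replaces the empty-check patch-up by an 'or'-fallback.
import Mathlib
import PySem

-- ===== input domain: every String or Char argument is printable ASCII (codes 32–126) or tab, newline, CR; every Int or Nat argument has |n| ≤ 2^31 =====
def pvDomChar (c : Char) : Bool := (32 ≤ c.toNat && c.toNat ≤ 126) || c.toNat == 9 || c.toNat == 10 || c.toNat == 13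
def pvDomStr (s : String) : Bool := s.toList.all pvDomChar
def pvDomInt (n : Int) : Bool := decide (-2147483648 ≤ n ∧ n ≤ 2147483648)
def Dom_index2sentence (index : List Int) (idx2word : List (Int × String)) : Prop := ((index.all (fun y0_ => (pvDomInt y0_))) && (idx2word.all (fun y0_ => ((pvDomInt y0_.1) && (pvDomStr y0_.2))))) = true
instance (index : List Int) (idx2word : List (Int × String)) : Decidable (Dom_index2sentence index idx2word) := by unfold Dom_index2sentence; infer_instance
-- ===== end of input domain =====

-- B replaces A's index loop with break/continue by structural recursion on the list (alternative decomposition, same cost).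


-- ===== PORT A =====
-- A's for-loop over range(len(index)) with break/continue and the accumulator `sen`;
-- a missing dict key (Python KeyError, excluded by Pre_) stops the loop.
def index2sentenceLoop (index : List Int) (idx2word : List (Int × String)) : Nat → List String → List String
  | i, sen =>
    if h : i < index.length then
      match (PySem.Dict.mk idx2word).get? index[i] with
      | none => sen
      | some w =>
        if w = "[SEP]" then sen
        else if w = "<S>" then index2sentenceLoop index idx2word (i+1) sen
        else index2sentenceLoop index idx2word (i+1) (sen ++ [w])
    else sen
  termination_by i _ => index.length - i

def index2sentence (index : List Int) (idx2word : List (Int × String)) : List String :=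
  let sen := index2sentenceLoop index idx2word 0 []
  if sen.length = 0 then sen ++ ["[UNK]"] else sen

-- ===== PORT B =====
-- structural recursion collecting words until '[SEP]' (none, i.e. KeyError, is outside Pre_)
def collectB (index : List Int) (idx2word : List (Int × String)) : List String :=
  match index with
  | [] => []
  | i :: rest =>
    match (PySem.Dict.mk idx2word).get? i with
    | none => []
    | some w =>
      if w = "[SEP]" then []
      else if w = "<S>" then collectB rest idx2word
      else w :: collectB rest idx2word

def index2sentence_alt (index : List Int) (idx2word : List (Int × String)) : List String :=
  let sen := collectB index idx2word
  if sen.isEmpty then ["[UNK]"] else sen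

-- ===== PRECONDITION & SPEC =====
-- Pre_ excludes exactly the inputs where Python A raises KeyError: some index reached
-- before the first '[SEP]' word is not a key of idx2word.
def Pre_index2sentence (index : List Int) (idx2word : List (Int × String)) : Prop :=
  (index.takeWhile (fun i => (PySem.Dict.mk idx2word).get? i ≠ some "[SEP]")).all
    (fun i => ((PySem.Dict.mk idx2word).get? i).isSome) = true
instance (index : List Int) (idx2word : List (Int × String)) : Decidable (Pre_index2sentence index idx2word) := by unfold Pre_index2sentence; infer_instance
def pvWitness_index2sentence : List Int × (List (Int × String)) := ([0, 1, 0], [(0, "hi"), (1, "[SEP]")])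

def Spec_index2sentence (index : List Int) (idx2word : List (Int × String)) (out : List String) : Prop := out = index2sentence_alt index idx2word
instance (index : List Int) (idx2word : List (Int × String)) (out : List String) : Decidable (Spec_index2sentence index idx2word out) := by unfold Spec_index2sentence; infer_instance

-- ===== CLAIM (what is proved, stated in full; the proofs are below) =====
def Claim_equal_index2sentence : Prop := ∀ (index : List Int) (idx2word : List (Int × String)), Dom_index2sentence index idx2word → Pre_index2sentence index idx2word → Spec_index2sentence index idx2word (index2sentence index idx2word)

-- ===== LEMMAS AND PROOFS =====
lemma loop_eq_collect (index : List Int) (idx2word : List (Int × String)) :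
    ∀ i sen, index2sentenceLoop index idx2word i sen = sen ++ collectB (index.drop i) idx2word := by
  intro i
  induction hn : index.length - i using Nat.strong_induction_on generalizing i with
  | _ n ih =>
    intro sen
    rw [index2sentenceLoop]
    by_cases h : i < index.length
    · have hdrop : index.drop i = index[i] :: index.drop (i+1) :=
        List.drop_eq_getElem_cons h
      simp only [dif_pos h, hdrop, collectB]
      cases hw : (PySem.Dict.mk idx2word).get? index[i] with
      | none => simp
      | some w =>
        by_cases hsep : w = "[SEP]"
        · simp [hsep]
        · by_cases hs : w = "<S>"
          · simp only [if_neg hsep, if_pos hs]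
            exact ih (index.length - (i+1)) (by omega) (i+1) rfl sen
          · simp only [if_neg hsep, if_neg hs]
            rw [ih (index.length - (i+1)) (by omega) (i+1) rfl (sen ++ [w])]
            simp
    · have : index.length ≤ i := by omega
      simp [dif_neg h, List.drop_of_length_le this, collectB]

-- ===== VERDICT (by name: the statement is the Claim_ definition above) =====
theorem index2sentence_spec : Claim_equal_index2sentence := by
  intro index idx2word _ _
  show index2sentence index idx2word = index2sentence_alt index idx2word
  unfold index2sentence index2sentence_alt
  rw [loop_eq_collect index idx2word 0 []]
  simp only [List.drop_zero, List.nil_append]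
  cases collectB index idx2word with
  | nil => simp
  | cons a t => simp
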